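-- pv_equiv track=rewrite | github.com/PTSVU/VUZ | sem-4/python/pract2/5.py | decode_val
-- ===== SOURCE A (Python) =====
-- def decode_val(n, k, encoded_val):
--     val = bin(encoded_val)[2:]
--     decoded_str = ''
--     one = 0
--     zero = 0
--     for i in range(len((str(bin(encoded_val)[2:])))):
--         if i % k == 0:
--             if one > zero:
--                 decoded_str += '1'
--             elif zero > one:
--                 decoded_str += '0'
--             one = 0
--             zero = 0
--         if val[i] == '1':
--             one += 1
--         if val[i] == '0':
--             zero += 1
--     if one > zero:
--         decoded_str += '1'
--     elif zero > one:
--         decoded_str += '0'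
--     return int(decoded_str, 2)
-- ===== SOURCE B (Python) =====
-- def decode_val(n, k, encoded_val):
--     val = bin(encoded_val)[2:]
--     decoded = ''
--     for i in range(0, len(val), k):
--         block = val[i:i + k]
--         ones = block.count('1')
--         zeros = block.count('0')
--         if ones > zeros:
--             decoded += '1'
--         elif zeros > ones:
--             decoded += '0'
--     return int(decoded, 2)
-- ===== Notes on version B (the rewrite author's own statement) =====
-- stated objective: simpler
-- what changed: B replaces A's per-bit loop with modular flushes of running one/zero counters by a per-block loop range(0, len(val), k) that slices each k-bit block and compares block.count('1') with block.count('0'); Pre_ restricts to the natural domain k >= 1 (A raises ZeroDivisionError at k = 0, and a negative block size is malformed input on which A's value is an accident of Python's modulo) and excludes inputs where every block ties so int('', 2) raises ValueError in both.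
-- outside the precondition, e.g. on decode_val(0, -2, 5): A returns 1, B raises ValueError; on decode_val(0, 2, 2): A raises ValueError, B raises ValueError
import Mathlib
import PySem

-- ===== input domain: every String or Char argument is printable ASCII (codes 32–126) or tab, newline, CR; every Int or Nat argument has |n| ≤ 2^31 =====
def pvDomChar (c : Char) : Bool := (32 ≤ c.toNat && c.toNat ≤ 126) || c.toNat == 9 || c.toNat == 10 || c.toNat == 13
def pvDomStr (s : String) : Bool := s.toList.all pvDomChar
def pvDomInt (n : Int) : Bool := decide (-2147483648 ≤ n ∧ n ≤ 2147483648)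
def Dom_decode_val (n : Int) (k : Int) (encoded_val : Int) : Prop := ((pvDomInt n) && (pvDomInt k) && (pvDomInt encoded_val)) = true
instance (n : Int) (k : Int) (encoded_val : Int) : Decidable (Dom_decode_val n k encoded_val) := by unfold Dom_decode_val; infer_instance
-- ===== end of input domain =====

-- B decodes per k-bit block (slice and count) instead of A's per-bit loop with modular counter flushes;
-- Pre_ restricts to the natural domain k ≥ 1 and to inputs where some block has a majority.

-- ===== PORT A =====
-- decoded_str += '1' / '0' flush, shared by both flush sites of A's code
def pvVote (ds : List Char) (one zero : Int) : List Char :=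
  if one > zero then ds ++ ['1'] else if zero > one then ds ++ ['0'] else ds

-- one iteration of A's loop body at index a on character c (= val[i])
def pvStepA (k : Int) (st : List Char × Int × Int) (a : Int) (c : Char) : List Char × Int × Int :=
  let st1 := if PySem.Int.mod a k = 0 then (pvVote st.1 st.2.1 st.2.2, (0 : Int), (0 : Int)) else st
  let st2 := if c = '1' then (st1.1, st1.2.1 + 1, st1.2.2) else st1
  if c = '0' then (st2.1, st2.2.1, st2.2.2 + 1) else st2

def decode_val (n : Int) (k : Int) (encoded_val : Int) : Int :=
  let val : List Char := PySem.List.slice (PySem.Int.toBinChars0b encoded_val) (some 2) none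
  let st := (PySem.List.pyRange 0 (val.length : Int) 1).foldl
      (fun st i => pvStepA k st i (PySem.List.pyGetD val i ' ')) ([], 0, 0)
  let ds := pvVote st.1 st.2.1 st.2.2
  (PySem.Int.ofCharsBase? ds 2).getD 0

-- ===== PORT B =====
-- for i in range(0, len(val), k): block = val[i:i+k]; vote on block.count('1') vs block.count('0')
def decode_val_alt (n : Int) (k : Int) (encoded_val : Int) : Int :=
  let val : List Char := PySem.List.slice (PySem.Int.toBinChars0b encoded_val) (some 2) none
  let ds := (PySem.List.pyRange 0 (val.length : Int) k).foldl
      (fun (out : List Char) i =>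
        let block := PySem.List.slice val (some i) (some (i + k))
        let ones : Int := block.count '1'
        let zeros : Int := block.count '0'
        if ones > zeros then out ++ ['1'] else if zeros > ones then out ++ ['0'] else out) []
  (PySem.Int.ofCharsBase? ds 2).getD 0

-- ===== PRECONDITION & SPEC =====
def pvBits (encoded_val : Int) : List Char :=
  PySem.List.slice (PySem.Int.toBinChars0b encoded_val) (some 2) none

-- Pre_ restricts to the natural domain k ≥ 1: at k = 0 A raises ZeroDivisionError, and a negative
-- block size is malformed input (A's value there is an accident of Python's modulo; B raises).
-- It also excludes inputs where every k-bit block of bin(encoded_val)[2:] ties, so that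
-- decoded_str stays empty and int('', 2) raises ValueError in both A and B.
def Pre_decode_val (n : Int) (k : Int) (encoded_val : Int) : Prop :=
  1 ≤ k ∧ ∃ b < ((pvBits encoded_val).length + k.toNat - 1) / k.toNat,
    (((pvBits encoded_val).drop (b * k.toNat)).take k.toNat).count '1'
      ≠ (((pvBits encoded_val).drop (b * k.toNat)).take k.toNat).count '0'
instance (n : Int) (k : Int) (encoded_val : Int) : Decidable (Pre_decode_val n k encoded_val) := by
  unfold Pre_decode_val; infer_instance

def pvWitness_decode_val : Int × Int × Int := (0, 2, 5)

def Spec_decode_val (n : Int) (k : Int) (encoded_val : Int) (out : Int) : Prop := out = decode_val_alt n k encoded_val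
instance (n : Int) (k : Int) (encoded_val : Int) (out : Int) : Decidable (Spec_decode_val n k encoded_val out) := by unfold Spec_decode_val; infer_instance

-- ===== CLAIM (what is proved, stated in full; the proofs are below) =====
def Claim_equal_decode_val : Prop := ∀ (n : Int) (k : Int) (encoded_val : Int), Dom_decode_val n k encoded_val → Pre_decode_val n k encoded_val → Spec_decode_val n k encoded_val (decode_val n k encoded_val)

-- ===== LEMMAS AND PROOFS =====

-- majority vote of a block, as the list of appended characters
def pvVote1 (one zero : Int) : List Char :=
  if one > zero then ['1'] else if zero > one then ['0'] else []

theorem pvVote_eq (ds : List Char) (one zero : Int) :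
    pvVote ds one zero = ds ++ pvVote1 one zero := by
  unfold pvVote pvVote1; split_ifs <;> simp

def pvBlockVote (cs : List Char) : List Char :=
  pvVote1 (cs.count '1' : Int) (cs.count '0' : Int)

-- majority votes of the successive blocks of size j+1
def pvVotes (j : Nat) : List Char → List Char
  | [] => []
  | c :: cs => pvBlockVote (c :: cs.take j) ++ pvVotes j (cs.drop j)
termination_by cs => cs.length
decreasing_by simp

-- A's loop as structural recursion over the remaining characters, carrying the absolute index
def pvGoA (k : Int) : List Char → Int → (List Char × Int × Int) → (List Char × Int × Int)
  | [], _, st => st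
  | c :: cs, a, st => pvGoA k cs (a + 1) (pvStepA k st a c)

theorem pvGoA_append (k : Int) (xs ys : List Char) (a : Int) (st : List Char × Int × Int) :
    pvGoA k (xs ++ ys) a st = pvGoA k ys (a + xs.length) (pvGoA k xs a st) := by
  induction xs generalizing a st with
  | nil => simp [pvGoA]
  | cons x xs ih =>
    have h : a + 1 + (xs.length : Int) = a + ((xs.length : Int) + 1) := by ring
    simp [pvGoA, ih, h]

-- bridge: A's foldl over range(len(val)) with val[i] equals pvGoA on the dropped suffix
theorem pvFold_eq_goA (k : Int) (val : List Char) :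
    ∀ (cs : List Char) (a : Int) (st : List Char × Int × Int),
      0 ≤ a → val.drop a.toNat = cs →
      (PySem.List.pyRange a (val.length : Int) 1).foldl
          (fun st i => pvStepA k st i (PySem.List.pyGetD val i ' ')) st
        = pvGoA k cs a st := by
  intro cs
  induction cs with
  | nil =>
    intro a st ha hdrop
    have hlen : (val.length : Int) ≤ a := by
      have := congrArg List.length hdrop; simp at this; omega
    rw [PySem.List.pyRange_one_eq_nil hlen]; rfl
  | cons c cs ih =>
    intro a st ha hdrop
    have hlt : a.toNat < val.length := by
      have := congrArg List.length hdrop; simp at this; omega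
    have hab : a < (val.length : Int) := by omega
    rw [PySem.List.pyRange_one_cons hab]
    simp only [List.foldl_cons]
    have hget : PySem.List.pyGetD val a ' ' = c := by
      rw [PySem.List.pyGetD_eq_getElem val ' ' ha (by exact_mod_cast hab)]
      have h0 : (val.drop a.toNat)[0]'(by simp [hdrop]) = c := by simp [hdrop]
      simpa using h0
    rw [hget, pvGoA]
    exact ih (a + 1) _ (by omega) (by
      have : (a + 1).toNat = a.toNat + 1 := by omega
      rw [this, ← List.drop_drop]
      rw [hdrop]; rfl)

-- within a block: no flush fires, the counters just accumulate
theorem pvGoA_no_flush (k : Int) :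
    ∀ (cs : List Char) (a : Int) (ds : List Char) (one zero : Int),
      (∀ j : Nat, j < cs.length → ¬ PySem.Int.mod (a + j) k = 0) →
      pvGoA k cs a (ds, one, zero)
        = (ds, one + (cs.count '1' : Int), zero + (cs.count '0' : Int)) := by
  intro cs
  induction cs with
  | nil => intro a ds one zero _; simp [pvGoA]
  | cons c cs ih =>
    intro a ds one zero h
    have h0 : ¬ PySem.Int.mod (a + (0 : Nat)) k = 0 := h 0 (by simp)
    simp only [Nat.cast_zero, add_zero] at h0
    rw [pvGoA, pvStepA]
    simp only [h0, ite_false]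
    rw [ih (a + 1) _ _ _ (fun j hj => by
      have := h (j + 1) (by simpa using Nat.succ_lt_succ hj)
      push_cast at this ⊢
      convert this using 3
      ring)]
    by_cases h1 : c = '1' <;> by_cases h2 : c = '0' <;> simp_all <;> ring_nf

theorem pvNatAbs_pos {k : Int} (hk : k ≠ 0) : 1 ≤ k.natAbs := by
  omega

-- full loop + final flush = per-block majority votes, by strong induction on blocks
theorem pvStepA_flush (k : Int) (ds : List Char) (one zero : Int) (a : Int) (c : Char)
    (h : PySem.Int.mod a k = 0) :
    pvStepA k (ds, one, zero) a c
      = (pvVote ds one zero, (if c = '1' then (1 : Int) else 0), (if c = '0' then (1 : Int) else 0)) := by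
  unfold pvStepA
  simp only [h]
  split_ifs with h1 h2 h2 <;> simp_all

theorem pvGoA_blocks (k : Int) (hk : k ≠ 0) :
    ∀ (m : Nat) (cs : List Char) (a : Int) (ds : List Char) (one zero : Int),
      cs.length ≤ m → 0 ≤ a → k ∣ a →
      (fun st : List Char × Int × Int => pvVote st.1 st.2.1 st.2.2)
          (pvGoA k cs a (ds, one, zero))
        = (ds ++ pvVote1 one zero) ++ pvVotes (k.natAbs - 1) cs := by
  intro m
  induction m with
  | zero =>
    intro cs a ds one zero hm _ _
    have : cs = [] := List.length_eq_zero_iff.mp (by omega)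
    subst this
    simp [pvGoA, pvVotes, pvVote_eq]
  | succ m ih =>
    intro cs a ds one zero hm ha hdvd
    cases cs with
    | nil => simp [pvGoA, pvVotes, pvVote_eq]
    | cons c cs' =>
      have hkk : 1 ≤ k.natAbs := pvNatAbs_pos hk
      have hflush : PySem.Int.mod a k = 0 := (PySem.Int.mod_eq_zero_iff_dvd a k).mpr hdvd
      rw [pvGoA, pvStepA_flush k ds one zero a c hflush]
      conv_lhs => rw [← List.take_append_drop (k.natAbs - 1) cs']
      rw [pvGoA_append]
      have hinner := pvGoA_no_flush k (cs'.take (k.natAbs - 1)) (a + 1) (pvVote ds one zero)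
          (if c = '1' then (1 : Int) else 0) (if c = '0' then (1 : Int) else 0) (by
        intro j hj hmod
        rw [PySem.Int.mod_eq_zero_iff_dvd] at hmod
        have hd1 : k ∣ ((1 + j : Nat) : Int) := by
          have hsub := dvd_sub hmod hdvd
          have he : a + 1 + (j : Int) - a = ((1 + j : Nat) : Int) := by push_cast; ring
          rwa [he] at hsub
        have hd2 : k.natAbs ∣ (1 + j) := by
          have hh := Int.natAbs_dvd_natAbs.mpr hd1
          rwa [Int.natAbs_natCast] at hh
        have := Nat.le_of_dvd (by omega) hd2
        simp only [List.length_take] at hj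
        omega)
      rw [hinner, pvVotes]
      cases hrem : cs'.drop (k.natAbs - 1) with
      | nil =>
        simp only [pvGoA, pvVotes, pvVote_eq, pvBlockVote]
        have hone : (if c = '1' then (1 : Int) else 0) + ((cs'.take (k.natAbs - 1)).count '1' : Int)
            = ((c :: cs'.take (k.natAbs - 1)).count '1' : Int) := by
          simp [List.count_cons]; split_ifs <;> ring
        have hzero : (if c = '0' then (1 : Int) else 0) + ((cs'.take (k.natAbs - 1)).count '0' : Int)
            = ((c :: cs'.take (k.natAbs - 1)).count '0' : Int) := by
          simp [List.count_cons]; split_ifs <;> ring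
        rw [hone, hzero]
        simp
      | cons d rest =>
        have hlenr := congrArg List.length hrem
        simp only [List.length_drop, List.length_cons] at hlenr
        have hlen' : k.natAbs - 1 ≤ cs'.length := by omega
        have htk : (cs'.take (k.natAbs - 1)).length = k.natAbs - 1 := by
          simp [List.length_take]; omega
        have hdvd2 : k ∣ (a + 1 + ((cs'.take (k.natAbs - 1)).length : Int)) := by
          rw [htk]
          have h1 : k ∣ ((k.natAbs : Nat) : Int) := Int.natAbs_dvd_natAbs.mp (by simp)
          have he : a + 1 + ((k.natAbs - 1 : Nat) : Int) = a + ((k.natAbs : Nat) : Int) := by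
            push_cast [Nat.cast_sub hkk]; ring
          rw [he]
          exact dvd_add hdvd h1
        rw [ih (d :: rest) _ _ _ _ (by
              simp only [List.length_cons] at hm ⊢; omega)
            (by positivity) hdvd2]
        have hone : (if c = '1' then (1 : Int) else 0) + ((cs'.take (k.natAbs - 1)).count '1' : Int)
            = ((c :: cs'.take (k.natAbs - 1)).count '1' : Int) := by
          simp [List.count_cons]; split_ifs <;> ring
        have hzero : (if c = '0' then (1 : Int) else 0) + ((cs'.take (k.natAbs - 1)).count '0' : Int)
            = ((c :: cs'.take (k.natAbs - 1)).count '0' : Int) := by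
          simp [List.count_cons]; split_ifs <;> ring
        rw [hone, hzero, pvVote_eq]
        simp [pvBlockVote]

-- B side: the foldl over range(0, len, k), seen through pyRange_of_pos as block indices,
-- produces exactly the votes of the remaining blocks
theorem pvFoldB (k : Int) (hk : 1 ≤ k) (val : List Char) :
    ∀ (cnt b : Nat) (out : List Char),
      b + cnt = (val.length + k.toNat - 1) / k.toNat →
      (List.range' b cnt).foldl
          (fun (out : List Char) (j : Nat) =>
            let block := PySem.List.slice val (some (0 + k * (j : Int))) (some (0 + k * (j : Int) + k))
            let ones : Int := block.count '1'
            let zeros : Int := block.count '0'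
            if ones > zeros then out ++ ['1'] else if zeros > ones then out ++ ['0'] else out) out
        = out ++ pvVotes (k.toNat - 1) (val.drop (b * k.toNat)) := by
  have hkt : 1 ≤ k.toNat := by omega
  have hNB : (val.length + k.toNat - 1) / k.toNat * k.toNat
      + (val.length + k.toNat - 1) % k.toNat = val.length + k.toNat - 1 := by
    rw [Nat.mul_comm]; exact Nat.div_add_mod _ _
  have hmod := Nat.mod_lt (val.length + k.toNat - 1) (y := k.toNat) (by omega)
  intro cnt
  induction cnt with
  | zero =>
    intro b out hb
    have hdrop : val.drop (b * k.toNat) = [] := by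
      apply List.drop_eq_nil_of_le
      have : (val.length + k.toNat - 1) / k.toNat * k.toNat ≤ b * k.toNat :=
        Nat.mul_le_mul_right _ (by omega)
      omega
    rw [hdrop]
    simp [pvVotes]
  | succ cnt ih =>
    intro b out hb
    rw [List.range'_succ, List.foldl_cons]
    have hblt : b * k.toNat < val.length := by
      have h1 : (b + 1) * k.toNat ≤ (val.length + k.toNat - 1) / k.toNat * k.toNat :=
        Nat.mul_le_mul_right _ (by omega)
      have h2 : (b + 1) * k.toNat = b * k.toNat + k.toNat := by ring
      omega
    have hkc : ((k.toNat : Nat) : Int) = k := Int.toNat_of_nonneg (by omega)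
    have hsl : PySem.List.slice val (some (0 + k * (b : Int))) (some (0 + k * (b : Int) + k))
        = (val.drop (b * k.toNat)).take k.toNat := by
      have h1 : 0 + k * (b : Int) = ((b * k.toNat : Nat) : Int) := by
        push_cast [hkc]; ring
      have h2 : 0 + k * (b : Int) + k = (((b + 1) * k.toNat : Nat) : Int) := by
        push_cast [hkc]; ring
      rw [h2, h1, PySem.List.slice_natCast]
      congr 1
      have : (b + 1) * k.toNat = b * k.toNat + k.toNat := by ring
      omega
    simp only [hsl]
    obtain ⟨d, tl, hd⟩ : ∃ d tl, val.drop (b * k.toNat) = d :: tl := by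
      cases hcs : val.drop (b * k.toNat) with
      | nil => exfalso; have := congrArg List.length hcs; simp at this; omega
      | cons d tl => exact ⟨d, tl, rfl⟩
    rw [ih (b + 1) _ (by omega)]
    rw [hd, pvVotes]
    have hblk : d :: tl.take (k.toNat - 1) = (val.drop (b * k.toNat)).take k.toNat := by
      rw [hd]
      have : k.toNat = (k.toNat - 1) + 1 := by omega
      rw [this, List.take_succ_cons]
      simp
    have hrest : tl.drop (k.toNat - 1) = val.drop ((b + 1) * k.toNat) := by
      have h1 : val.drop ((b + 1) * k.toNat) = (val.drop (b * k.toNat)).drop k.toNat := by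
        rw [List.drop_drop]
        congr 1
        have : (b + 1) * k.toNat = b * k.toNat + k.toNat := by ring
        omega
      rw [h1, hd]
      have : k.toNat = (k.toNat - 1) + 1 := by omega
      rw [this, List.drop_succ_cons]
      simp
    rw [hblk, hrest, pvBlockVote, pvVote1, hd]
    split_ifs <;> simp

-- ===== VERDICT (by name: the statement is the Claim_ definition above) =====
set_option maxHeartbeats 1000000 in
theorem decode_val_spec : Claim_equal_decode_val := by
  intro n k encoded_val _ hpre
  obtain ⟨hk, -⟩ := hpre
  obtain ⟨kt, rfl⟩ : ∃ kt : Nat, k = (kt : Int) :=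
    ⟨k.toNat, (Int.toNat_of_nonneg (by omega)).symm⟩
  have hkt : 1 ≤ kt := by omega
  have hk0 : (0 : Int) < (kt : Int) := by omega
  have hkne : (kt : Int) ≠ 0 := by omega
  have key : ∀ val : List Char,
      (fun st : List Char × Int × Int => pvVote st.1 st.2.1 st.2.2)
        ((PySem.List.pyRange 0 (val.length : Int) 1).foldl
          (fun st i => pvStepA (kt : Int) st i (PySem.List.pyGetD val i ' ')) ([], 0, 0))
      = (PySem.List.pyRange 0 (val.length : Int) (kt : Int)).foldl
          (fun (out : List Char) i =>
            let block := PySem.List.slice val (some i) (some (i + (kt : Int)))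
            let ones : Int := block.count '1'
            let zeros : Int := block.count '0'
            if ones > zeros then out ++ ['1'] else if zeros > ones then out ++ ['0'] else out) [] := by
    intro val
    rw [pvFold_eq_goA (kt : Int) val val 0 ([], 0, 0) le_rfl (by simp)]
    rw [pvGoA_blocks (kt : Int) hkne val.length val 0 [] 0 0 le_rfl le_rfl (dvd_zero _)]
    rw [PySem.List.pyRange_of_pos 0 (val.length : Int) hk0, List.foldl_map]
    by_cases hL : 0 < (val.length : Int)
    · have hNcast : (((val.length : Int) - 0 + (kt : Int) - 1) / (kt : Int)).toNat
          = (val.length + kt - 1) / kt := by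
        have h1 : (val.length : Int) - 0 + (kt : Int) - 1
            = ((val.length + kt - 1 : Nat) : Int) := by
          push_cast [Nat.cast_sub (by omega : 1 ≤ val.length + kt)]
          ring
        rw [h1, ← Int.natCast_div, Int.toNat_natCast]
      rw [if_pos hL, hNcast, List.range_eq_range']
      have hB := pvFoldB (kt : Int) (by exact_mod_cast hk) val ((val.length + kt - 1) / kt) 0 []
        (by simp [Int.toNat_natCast])
      simp only [Int.toNat_natCast] at hB
      simp only [Nat.zero_mul, List.drop_zero, List.nil_append] at hB
      refine Eq.trans (by simp [pvVote1]) hB.symm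
    · have hv : val = [] := by
        cases val with
        | nil => rfl
        | cons a l => exfalso; simp at hL
      subst hv
      simp [pvVotes, pvVote1]
  unfold Spec_decode_val decode_val decode_val_alt
  exact congrArg (fun ds => (PySem.Int.ofCharsBase? ds 2).getD 0)
    (key (PySem.List.slice (PySem.Int.toBinChars0b encoded_val) (some 2) none))
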